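-- pv_equiv track=rewrite | github.com/brunospcastro/IA-Tetris | student.py | completeLines
-- ===== SOURCE A (Python) =====
-- def highest(lista):
--     if lista == []:
--         return None
--     lista.sort(key=lambda x: x[1])
--     return lista[0][1]
--
-- def completeLines(game):
--     h = highest(game)
--     totalLines = 0
--     if h != None:
--         for j in range(29,h-1,-1):
--             counter = 0
--             for i in range(1,9):
--                 if [i,j] in game:
--                     counter += 1
--             if counter == 8:
--                 totalLines += 1
--     return totalLines
-- ===== SOURCE B (Python) =====
-- # B: one linear pass building a row -> column-set dict, then count rows whose set has all 8 columns.
-- # Note: A sorts `game` in place (via highest); B does not mutate its argument — the equivalence claimed is about the return value only.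
-- def completeLines(game):
--     cols = {}
--     for cell in game:
--         if len(cell) == 2:
--             i, j = cell
--             if 1 <= i <= 8 and j <= 29:
--                 s = cols.get(j)
--                 if s is None:
--                     cols[j] = s = set()
--                 s.add(i)
--     return sum(1 for s in cols.values() if len(s) == 8)
-- ===== Notes on version B (the rewrite author's own statement) =====
-- stated objective: faster
-- what changed: Replaces the per-row scan over range(29,h-1,-1) with its eight '[i,j] in game' linear membership probes by a single pass that groups cells into a row->column-set dict and counts rows holding all 8 columns (B does not reproduce A's in-place sort of game; return value is identical).
import Mathlib
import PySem

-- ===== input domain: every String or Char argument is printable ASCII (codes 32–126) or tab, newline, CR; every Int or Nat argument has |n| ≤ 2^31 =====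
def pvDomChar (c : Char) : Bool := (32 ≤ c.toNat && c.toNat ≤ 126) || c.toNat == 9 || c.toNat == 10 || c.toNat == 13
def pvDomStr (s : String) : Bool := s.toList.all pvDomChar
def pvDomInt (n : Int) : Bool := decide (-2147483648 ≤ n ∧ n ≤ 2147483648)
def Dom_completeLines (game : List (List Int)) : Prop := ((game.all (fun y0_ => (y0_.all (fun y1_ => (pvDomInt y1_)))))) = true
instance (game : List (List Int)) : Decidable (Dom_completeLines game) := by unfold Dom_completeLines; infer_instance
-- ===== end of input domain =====

-- B replaces A's per-row membership probing (range(29,h-1,-1) × range(1,9) with '[i,j] in game')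
-- by a single pass building a row -> column-set dict and counting full rows; measurably faster.
-- A sorts `game` in place (via highest); B does not mutate it — the equivalence is about the return value.


-- ===== PORT A =====
-- highest: sorts by x[1] and returns the first cell's y (None on []); the in-place sort
-- itself is unobservable in the return value, so the port keeps only the sorted list it reads from.
def highestA (lista : List (List Int)) : Option Int :=
  if lista = [] then none
  else
    let s := PySem.List.sorted lista (fun x => PySem.List.pyGetD x 1 0) false
    some (PySem.List.pyGetD (PySem.List.pyGetD s 0 []) 1 0)

def completeLines (game : List (List Int)) : Int :=
  let h := highestA game
  match h with
  | none => 0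
  | some hv =>
    (PySem.List.pyRange 29 (hv - 1) (-1)).foldl (fun totalLines j =>
      let counter : Int := (PySem.List.pyRange 1 9 1).foldl
        (fun c i => if [i, j] ∈ game then c + 1 else c) 0
      if counter = 8 then totalLines + 1 else totalLines) 0

-- ===== PORT B =====
-- one loop iteration of B: length-2 cells with a column in 1..8 and row ≤ 29 add their column
-- to the row's set (cols.setdefault-style insert keeps the key's position)
def cellStepB (d : PySem.Dict Int (PySem.Set Int)) (c : List Int) : PySem.Dict Int (PySem.Set Int) :=
  match c with
  | [i, j] =>
      if 1 ≤ i ∧ i ≤ 8 ∧ j ≤ 29 then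
        d.insert j (PySem.Set.add (d.getD j PySem.Set.empty) i)
      else d
  | _ => d

def completeLines_alt (game : List (List Int)) : Int :=
  let cols := game.foldl cellStepB PySem.Dict.empty
  cols.values.foldl (fun acc s => if PySem.Set.len s = 8 then acc + 1 else acc) 0

-- ===== PRECONDITION & SPEC =====
-- Pre_ excludes exactly the inputs on which the Python A raises: a cell with fewer than 2
-- entries makes highest's sort key x[1] fail with IndexError.
def Pre_completeLines (game : List (List Int)) : Prop := ∀ c ∈ game, 2 ≤ c.length
instance (game : List (List Int)) : Decidable (Pre_completeLines game) := by unfold Pre_completeLines; infer_instance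
def pvWitness_completeLines : List (List Int) := [[1, 5], [2, 5], [3, 40, 7]]

def Spec_completeLines (game : List (List Int)) (out : Int) : Prop := out = completeLines_alt game
instance (game : List (List Int)) (out : Int) : Decidable (Spec_completeLines game out) := by unfold Spec_completeLines; infer_instance

-- ===== CLAIM (what is proved, stated in full; the proofs are below) =====
def Claim_equal_completeLines : Prop := ∀ (game : List (List Int)), Dom_completeLines game → Pre_completeLines game → Spec_completeLines game (completeLines game)

-- ===== LEMMAS AND PROOFS =====

-- the cells B's pass keeps, as (column, row) pairs
def cellOf? (c : List Int) : Option (Int × Int) :=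
  match c with
  | [i, j] => if 1 ≤ i ∧ i ≤ 8 ∧ j ≤ 29 then some (i, j) else none
  | _ => none

def cellsOf (game : List (List Int)) : List (Int × Int) := game.filterMap cellOf?

-- 'row j is full' as A tests it
def fullRow (game : List (List Int)) (j : Int) : Bool :=
  (PySem.List.pyRange 1 9 1).all (fun i => decide ([i, j] ∈ game))

def pairStep (d : PySem.Dict Int (PySem.Set Int)) (p : Int × Int) : PySem.Dict Int (PySem.Set Int) :=
  d.insert p.2 (PySem.Set.add (d.getD p.2 PySem.Set.empty) p.1)

lemma cellStepB_eq (d : PySem.Dict Int (PySem.Set Int)) (c : List Int) :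
    cellStepB d c = match cellOf? c with
      | some p => pairStep d p
      | none => d := by
  rcases c with _ | ⟨i, _ | ⟨j, _ | ⟨k, t⟩⟩⟩ <;> simp only [cellStepB, cellOf?, pairStep]
  split <;> rfl

lemma foldl_cellStepB (game : List (List Int)) (d : PySem.Dict Int (PySem.Set Int)) :
    game.foldl cellStepB d = (cellsOf game).foldl pairStep d := by
  induction game generalizing d with
  | nil => rfl
  | cons c t ih =>
      simp only [List.foldl_cons, cellStepB_eq, cellsOf, List.filterMap_cons]
      cases h : cellOf? c <;> simp [ih, cellsOf]

lemma getD_foldl_pairStep (l : List (Int × Int)) (d : PySem.Dict Int (PySem.Set Int)) (j : Int) :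
    (l.foldl pairStep d).getD j PySem.Set.empty =
      PySem.Set.update (d.getD j PySem.Set.empty) ((l.filter (fun p => p.2 == j)).map (·.1)) := by
  induction l generalizing d with
  | nil => simp [PySem.Set.update]
  | cons p t ih =>
      simp only [List.foldl_cons, List.filter_cons]
      by_cases hpj : p.2 = j
      · subst hpj
        simp only [BEq.rfl, if_pos, List.map_cons, PySem.Set.update_cons, ih, pairStep,
          PySem.Dict.getD_insert]
      · have : (p.2 == j) = false := by simp [hpj]
        simp only [this, Bool.false_eq_true, ih, pairStep, PySem.Dict.getD_insert,
          if_neg (Ne.symm hpj)]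
        simp

lemma cellOf?_eq_some (c : List Int) (i j : Int) :
    cellOf? c = some (i, j) ↔ (c = [i, j] ∧ 1 ≤ i ∧ i ≤ 8 ∧ j ≤ 29) := by
  rcases c with _ | ⟨a, _ | ⟨b, _ | ⟨k, t⟩⟩⟩ <;> simp [cellOf?]
  omega

lemma colsAt_spec (game : List (List Int)) (j i : Int) :
    i ∈ ((cellsOf game).filter (fun p => p.2 == j)).map (·.1) ↔
      ([i, j] ∈ game ∧ 1 ≤ i ∧ i ≤ 8 ∧ j ≤ 29) := by
  simp only [List.mem_map, List.mem_filter, cellsOf, List.mem_filterMap, beq_iff_eq]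
  constructor
  · rintro ⟨⟨a, b⟩, ⟨⟨c, hc, hs⟩, hb⟩, rfl⟩
    rcases (cellOf?_eq_some c a b).mp hs with ⟨rfl, h1, h2, h3⟩
    subst hb
    exact ⟨hc, h1, h2, h3⟩
  · rintro ⟨hmem, h1, h2, h3⟩
    exact ⟨(i, j), ⟨⟨[i, j], hmem, (cellOf?_eq_some _ i j).mpr ⟨rfl, h1, h2, h3⟩⟩, rfl⟩, rfl⟩

-- a row's distinct-column set has 8 elements iff A's full-row test holds (for rows ≤ 29)
lemma len_ofList_cols (game : List (List Int)) (j : Int) (hj29 : j ≤ 29) :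
    (PySem.Set.ofList (((cellsOf game).filter (fun p => p.2 == j)).map (·.1))).length = 8 ↔
      fullRow game j = true := by
  set s := PySem.Set.ofList (((cellsOf game).filter (fun p => p.2 == j)).map (·.1)) with hs
  have hnd : s.Nodup := PySem.Set.nodup_ofList _
  have hmem : ∀ i, i ∈ s ↔ ([i, j] ∈ game ∧ 1 ≤ i ∧ i ≤ 8 ∧ j ≤ 29) := fun i =>
    (PySem.Set.mem_ofList _ i).trans (colsAt_spec game j i)
  have hlen9 : (PySem.List.pyRange 1 9 1).length = 8 := by decide
  have hsub : s ⊆ PySem.List.pyRange 1 9 1 := by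
    intro i hi
    rcases (hmem i).mp hi with ⟨_, h1, h2, _⟩
    exact (PySem.List.mem_pyRange_one).mpr ⟨h1, by omega⟩
  have hsp : s.Subperm (PySem.List.pyRange 1 9 1) := List.subperm_of_subset hnd hsub
  rw [fullRow, List.all_eq_true]
  constructor
  · intro h8 i hi
    have hperm : s.Perm (PySem.List.pyRange 1 9 1) := hsp.perm_of_length_le (by omega)
    have : i ∈ s := hperm.mem_iff.mpr hi
    simpa using ((hmem i).mp this).1
  · intro hall
    have hsub2 : PySem.List.pyRange 1 9 1 ⊆ s := by
      intro i hi
      have hb := (PySem.List.mem_pyRange_one).mp hi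
      have hg : [i, j] ∈ game := by simpa using hall i hi
      exact (hmem i).mpr ⟨hg, hb.1, by omega, hj29⟩
    have hsp2 := List.subperm_of_subset (PySem.List.nodup_pyRange_one 1 9) hsub2
    have hl1 := hsp.length_le
    have hl2 := hsp2.length_le
    omega

lemma mem_js (game : List (List Int)) (j : Int) :
    j ∈ (cellsOf game).map (·.2) ↔ ∃ i, [i, j] ∈ game ∧ 1 ≤ i ∧ i ≤ 8 ∧ j ≤ 29 := by
  simp only [cellsOf, List.mem_map, List.mem_filterMap]
  constructor
  · rintro ⟨⟨i, j'⟩, ⟨c, hc, hsome⟩, rfl⟩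
    rcases (cellOf?_eq_some c i j').mp hsome with ⟨rfl, h1, h2, h3⟩
    exact ⟨i, hc, h1, h2, h3⟩
  · rintro ⟨i, hc, h1, h2, h3⟩
    exact ⟨(i, j), ⟨[i, j], hc, (cellOf?_eq_some _ i j).mpr ⟨rfl, h1, h2, h3⟩⟩, rfl⟩

-- A's value as a countP over its row range
lemma completeLines_eq_countP (game : List (List Int)) (hv : Int)
    (h : highestA game = some hv) :
    completeLines game = ((PySem.List.pyRange 29 (hv - 1) (-1)).countP (fullRow game) : Int) := by
  have hin : ∀ j : Int,
      ((PySem.List.pyRange 1 9 1).foldl (fun c i => if [i, j] ∈ game then c + 1 else c) (0 : Int))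
        = ((PySem.List.pyRange 1 9 1).countP (fun i => decide ([i, j] ∈ game)) : Int) := by
    intro j
    simpa using PySem.List.foldl_count_if (fun i => decide ([i, j] ∈ game)) (PySem.List.pyRange 1 9 1) 0
  have hlen9 : (PySem.List.pyRange 1 9 1).length = 8 := by decide
  have hcond : ∀ j : Int,
      (((PySem.List.pyRange 1 9 1).countP (fun i => decide ([i, j] ∈ game)) : Int) = 8)
        ↔ fullRow game j = true := by
    intro j
    rw [fullRow, List.all_eq_true, show ((8 : Int)) = ((8 : Nat) : Int) from rfl, Int.natCast_inj,
      ← hlen9, List.countP_eq_length]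
  have hfold : ∀ (l : List Int) (t : Int),
      l.foldl (fun totalLines j =>
        let counter : Int := (PySem.List.pyRange 1 9 1).foldl
          (fun c i => if [i, j] ∈ game then c + 1 else c) 0
        if counter = 8 then totalLines + 1 else totalLines) t
        = l.foldl (fun tl j => if fullRow game j then tl + 1 else tl) t := by
    intro l
    induction l with
    | nil => intro t; rfl
    | cons a l ih =>
        intro t
        simp only [List.foldl_cons, ih]
        congr 1
        simp only [hin a]
        by_cases hfa : fullRow game a = true
        · rw [if_pos ((hcond a).mpr hfa), if_pos hfa]
        · rw [if_neg (fun hx => hfa ((hcond a).mp hx)), if_neg (by simp [hfa])]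
  simp only [completeLines, h]
  rw [hfold]
  simpa using PySem.List.foldl_count_if (fullRow game) (PySem.List.pyRange 29 (hv - 1) (-1)) 0

-- B's value as a countP over the distinct rows seen
lemma completeLines_alt_eq_countP (game : List (List Int)) :
    completeLines_alt game =
      ((PySem.Set.ofList ((cellsOf game).map (·.2))).countP (fullRow game) : Int) := by
  simp only [completeLines_alt]
  rw [foldl_cellStepB]
  have hkeys : ((cellsOf game).foldl pairStep PySem.Dict.empty).keys
      = PySem.Set.ofList ((cellsOf game).map (·.2)) := by
    have := PySem.Dict.keys_foldl_insert_key (cellsOf game) (fun p => p.2)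
      (fun d p => PySem.Set.add (d.getD p.2 PySem.Set.empty) p.1) (PySem.Dict.empty (ν := PySem.Set Int))
    simpa [pairStep, PySem.Set.update_empty] using this
  have hnod : ((cellsOf game).foldl pairStep PySem.Dict.empty).keys.Nodup := by
    have := PySem.Dict.nodup_keys_foldl_insert_key (cellsOf game) (fun p => p.2)
      (fun d p => PySem.Set.add (d.getD p.2 PySem.Set.empty) p.1)
      (PySem.Dict.empty (ν := PySem.Set Int)) List.nodup_nil
    simpa [pairStep] using this
  rw [PySem.Dict.values_eq_map_keys _ hnod PySem.Set.empty]
  have hfold : ∀ (vs : List (PySem.Set Int)),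
      vs.foldl (fun acc s => if PySem.Set.len s = 8 then acc + 1 else acc) (0 : Int)
        = (vs.countP (fun s => decide (PySem.Set.len s = 8)) : Int) := by
    intro vs
    simpa using PySem.List.foldl_count_if (fun s => decide (PySem.Set.len s = 8)) vs 0
  rw [hfold, List.countP_map, hkeys]
  congr 1
  apply List.countP_congr
  intro j hj
  have hj29 : j ≤ 29 := by
    rcases (mem_js game j).mp ((PySem.Set.mem_ofList _ _).mp hj) with ⟨i, _, _, _, h29⟩
    exact h29
  have hget : ((cellsOf game).foldl pairStep PySem.Dict.empty).getD j PySem.Set.empty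
      = PySem.Set.ofList (((cellsOf game).filter (fun p => p.2 == j)).map (·.1)) := by
    rw [getD_foldl_pairStep]
    simpa using PySem.Set.update_empty _
  simp only [Function.comp, hget, decide_eq_true_eq, PySem.Set.len]
  rw [← len_ofList_cols game j hj29]
  constructor
  · intro hx; exact_mod_cast hx
  · intro hx; exact_mod_cast hx

lemma highestA_le (game : List (List Int)) (hv : Int) (h : highestA game = some hv) :
    ∀ c ∈ game, hv ≤ PySem.List.pyGetD c 1 0 := by
  intro c hc
  by_cases hg : game = []
  · simp [highestA, hg] at h
  · rw [highestA, if_neg hg] at h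
    cases hs : PySem.List.sorted game (fun x => PySem.List.pyGetD x 1 0) false with
    | nil => exact absurd ((PySem.List.sorted_eq_nil_iff _ _ _).mp hs) hg
    | cons m t =>
        have hk := PySem.List.key_head_sorted_le game (fun x => PySem.List.pyGetD x 1 0) hs c hc
        simp only [hs, PySem.List.pyGetD_zero_cons, Option.some.injEq] at h
        exact h ▸ hk

-- ===== VERDICT (by name: the statement is the Claim_ definition above) =====
theorem completeLines_spec : Claim_equal_completeLines := by
  intro game _ _
  unfold Spec_completeLines
  cases hg : highestA game with
  | none =>
      have hnil : game = [] := by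
        by_contra hne
        simp [highestA, hne] at hg
      subst hnil
      rfl
  | some hv =>
      rw [completeLines_eq_countP game hv hg, completeLines_alt_eq_countP]
      have hJ : ∀ j, j ∈ PySem.Set.ofList ((cellsOf game).map (·.2)) ↔
          ∃ i, [i, j] ∈ game ∧ 1 ≤ i ∧ i ≤ 8 ∧ j ≤ 29 := fun j =>
        (PySem.Set.mem_ofList _ _).trans (mem_js game j)
      have hle : ∀ i j : Int, [i, j] ∈ game → hv ≤ j := by
        intro i j hm
        have := highestA_le game hv hg [i, j] hm
        simpa [show PySem.List.pyGetD [i, j] 1 0 = j from rfl] using this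
      have hnd1 : ((PySem.List.pyRange 29 (hv - 1) (-1)).filter (fullRow game)).Nodup := by
        rw [PySem.List.pyRange_neg_one_eq_reverse]
        exact (List.nodup_reverse.mpr (PySem.List.nodup_pyRange_one _ _)).filter _
      have hnd2 : ((PySem.Set.ofList ((cellsOf game).map (·.2))).filter (fullRow game)).Nodup :=
        (PySem.Set.nodup_ofList _).filter _
      have hperm : ((PySem.List.pyRange 29 (hv - 1) (-1)).filter (fullRow game)).Perm
          ((PySem.Set.ofList ((cellsOf game).map (·.2))).filter (fullRow game)) := by
        rw [List.perm_ext_iff_of_nodup hnd1 hnd2]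
        intro j
        simp only [List.mem_filter]
        constructor
        · rintro ⟨hr, hf⟩
          have hb := PySem.List.mem_pyRange_neg_one.mp hr
          have h1 : [(1 : Int), j] ∈ game := by
            have := (List.all_eq_true.mp hf) 1 (by decide)
            simpa using this
          exact ⟨(hJ j).mpr ⟨1, h1, by norm_num, by norm_num, by omega⟩, hf⟩
        · rintro ⟨hr, hf⟩
          rcases (hJ j).mp hr with ⟨i, hm, _, _, hj29⟩
          have := hle i j hm
          exact ⟨PySem.List.mem_pyRange_neg_one.mpr ⟨by omega, hj29⟩, hf⟩
      rw [List.countP_eq_length_filter, List.countP_eq_length_filter, hperm.length_eq]
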